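-- pv_equiv track=rewrite | github.com/pypi-data/pypi-mirror-352 | packages/graphai-client/graphai_client-1.16.0-py3-none-any.whl/graphai_client/client_api/utils.py | limit_total_length_list_of_text
-- ===== SOURCE A (Python) =====
-- from typing import Callable, Dict, Optional, Tuple, List
--
-- def limit_total_length_list_of_text(
--         list_of_texts: List[str], max_total_text_length: Optional[int] = None,
--         mapping_from_split_to_original: Optional[Dict[int, int]] = None
-- ):
--     if mapping_from_split_to_original is None:
--         mapping_from_split_to_original = {i: i for i in range(len(list_of_texts))}
--     lengths_text = [len(t) if t is not None else 0 for t in list_of_texts]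
--     total_text_length = sum(lengths_text)
--     if total_text_length > max_total_text_length:
--         idx_start = 0
--         sum_length = 0
--         n_text_elems = len(list_of_texts)
--         for idx_end in range(n_text_elems):
--             sum_length += lengths_text[idx_end]
--             # we reached the end
--             if idx_end + 1 == n_text_elems:
--                 yield (
--                     list_of_texts[idx_start:],
--                     {
--                         split_idx: mapping_from_split_to_original[split_idx]
--                         for split_idx in range(idx_start, n_text_elems)
--                     }
--                 )
--                 return
--             # one element is already too large
--             elif lengths_text[idx_start] > max_total_text_length:
--                 yield [list_of_texts[idx_start]], {idx_start: mapping_from_split_to_original[idx_start]}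
--                 idx_start += 1
--                 sum_length = 0
--             # with the next element the list becomes too large
--             elif sum_length + lengths_text[idx_end + 1] > max_total_text_length:
--                 yield (
--                     list_of_texts[idx_start:idx_end + 1],
--                     {
--                         split_idx: mapping_from_split_to_original[split_idx]
--                         for split_idx in range(idx_start, idx_end + 1)
--                     }
--                 )
--                 idx_start = idx_end + 1
--                 sum_length = 0
--     else:
--         yield list_of_texts, mapping_from_split_to_original
-- ===== SOURCE B (Python) =====
-- from typing import Dict, Optional, List
--
--
-- def limit_total_length_list_of_text(
--         list_of_texts: List[str], max_total_text_length: Optional[int] = None,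
--         mapping_from_split_to_original: Optional[Dict[int, int]] = None
-- ):
--     if mapping_from_split_to_original is None:
--         mapping_from_split_to_original = {i: i for i in range(len(list_of_texts))}
--     lengths_text = [len(t) if t is not None else 0 for t in list_of_texts]
--     if sum(lengths_text) > max_total_text_length:
--         chunk = []      # absolute indices of the current chunk
--         chunk_sum = 0
--         for idx, length in enumerate(lengths_text):
--             if chunk and chunk_sum + length > max_total_text_length:
--                 yield (
--                     [list_of_texts[i] for i in chunk],
--                     {i: mapping_from_split_to_original[i] for i in chunk},
--                 )
--                 chunk = []
--                 chunk_sum = 0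
--             chunk.append(idx)
--             chunk_sum += length
--         if chunk:
--             yield (
--                 [list_of_texts[i] for i in chunk],
--                 {i: mapping_from_split_to_original[i] for i in chunk},
--             )
--     else:
--         yield list_of_texts, mapping_from_split_to_original
-- ===== Notes on version B (the rewrite author's own statement) =====
-- stated objective: simpler
-- what changed: Replaces the three-branch index-window loop (lookahead overflow test on the NEXT element, a separate oversized-singleton branch, explicit idx_start/idx_end slicing and an early return) by a plain accumulate-and-flush greedy pass: one flush condition checked when each element arrives, a final flush after the loop; oversized elements fall out naturally because an empty chunk is never flushed.
-- outside the precondition, e.g. on limit_total_length_list_of_text(['ab'], None, None): A raises TypeError, B raises TypeError; on limit_total_length_list_of_text(['ab', 'cd'], 2, {5: 5}): A raises KeyError, B raises KeyError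
import Mathlib
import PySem

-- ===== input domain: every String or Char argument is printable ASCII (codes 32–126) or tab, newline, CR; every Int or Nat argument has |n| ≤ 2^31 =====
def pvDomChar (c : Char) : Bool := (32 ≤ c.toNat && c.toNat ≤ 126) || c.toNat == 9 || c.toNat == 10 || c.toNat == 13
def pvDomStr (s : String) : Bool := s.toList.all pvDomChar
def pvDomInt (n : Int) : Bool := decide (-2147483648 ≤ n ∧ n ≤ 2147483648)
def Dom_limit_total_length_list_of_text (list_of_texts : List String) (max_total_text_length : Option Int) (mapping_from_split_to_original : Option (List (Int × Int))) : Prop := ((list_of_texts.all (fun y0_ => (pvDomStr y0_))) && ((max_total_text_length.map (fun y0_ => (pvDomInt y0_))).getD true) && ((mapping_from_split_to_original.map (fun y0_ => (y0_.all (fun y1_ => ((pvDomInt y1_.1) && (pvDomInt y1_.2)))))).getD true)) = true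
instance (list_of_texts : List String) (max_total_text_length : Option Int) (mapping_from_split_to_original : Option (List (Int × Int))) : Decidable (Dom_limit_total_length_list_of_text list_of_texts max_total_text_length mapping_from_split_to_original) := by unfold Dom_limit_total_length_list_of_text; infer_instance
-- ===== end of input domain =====

-- B replaces A's three-branch lookahead window loop by an accumulate-and-flush greedy pass (same cost, plainer control flow); equal return values proved on Pre_.

-- ===== PORT A =====
-- dict lookup mapping[k] (first match; Pre_ guarantees the key exists wherever A looks one up)
def pvLookupD (m : List (Int × Int)) (k : Int) : Int := (m.lookup k).getD 0

-- identity mapping {i: i for i in range(len(xs))}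
def pvIdMap (n : Nat) : List (Int × Int) := (List.range n).map (fun i => ((i : Int), (i : Int)))

-- the 'for idx_end in range(n)' loop; k = number of remaining iterations (k + idx_end = n);
-- xs[a:b] on in-range 0 ≤ a ≤ b is exactly (xs.drop a).take (b - a), xs[a:] is xs.drop a
def pvALoop (texts : List String) (lens : List Int) (mp : List (Int × Int)) (M : Int) (n : Nat) :
    Nat → Nat → Nat → Int → List (List String × (List (Int × Int)))
  | 0, _, _, _ => []
  | k + 1, idx_end, idx_start, sum_length =>
    let sum_length := sum_length + lens.getD idx_end 0
    if idx_end + 1 = n then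
      [(texts.drop idx_start,
        (List.range' idx_start (n - idx_start)).map (fun i => ((i : Int), pvLookupD mp (i : Int))))]
    else if lens.getD idx_start 0 > M then
      ([texts.getD idx_start ""], [((idx_start : Int), pvLookupD mp (idx_start : Int))]) ::
        pvALoop texts lens mp M n k (idx_end + 1) (idx_start + 1) 0
    else if sum_length + lens.getD (idx_end + 1) 0 > M then
      ((texts.drop idx_start).take (idx_end + 1 - idx_start),
        (List.range' idx_start (idx_end + 1 - idx_start)).map
          (fun i => ((i : Int), pvLookupD mp (i : Int)))) ::
        pvALoop texts lens mp M n k (idx_end + 1) (idx_end + 1) 0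
    else
      pvALoop texts lens mp M n k (idx_end + 1) idx_start sum_length

def limit_total_length_list_of_text (list_of_texts : List String) (max_total_text_length : Option Int) (mapping_from_split_to_original : Option (List (Int × Int))) : List (List String × (List (Int × Int))) :=
  let mp := mapping_from_split_to_original.getD (pvIdMap list_of_texts.length)
  let lengths_text := list_of_texts.map PySem.Str.len
  let total := lengths_text.sum
  match max_total_text_length with
  | none => []   -- unreachable under Pre_: 'total > None' raises TypeError in Python
  | some M =>
    if total > M then
      pvALoop list_of_texts lengths_text mp M list_of_texts.length list_of_texts.length 0 0 0
    else
      [(list_of_texts, mp)]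

-- ===== PORT B =====
-- B emits a chunk as its list of absolute indices
def pvEmit (texts : List String) (mp : List (Int × Int)) (chunk : List Nat) :
    List String × (List (Int × Int)) :=
  (chunk.map (fun i => texts.getD i ""), chunk.map (fun i => ((i : Int), pvLookupD mp (i : Int))))

-- B's single pass: flush the non-empty current chunk when the arriving element would overflow it,
-- append the element, and flush the final non-empty chunk after the loop
def pvBGo (texts : List String) (mp : List (Int × Int)) (M : Int) :
    List Int → Nat → List Nat → Int → List (List String × (List (Int × Int)))
  | [], _, chunk, _ => if chunk ≠ [] then [pvEmit texts mp chunk] else []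
  | l :: rest, idx, chunk, chunk_sum =>
    if chunk ≠ [] ∧ chunk_sum + l > M then
      pvEmit texts mp chunk :: pvBGo texts mp M rest (idx + 1) [idx] l
    else
      pvBGo texts mp M rest (idx + 1) (chunk ++ [idx]) (chunk_sum + l)

def limit_total_length_list_of_text_alt (list_of_texts : List String) (max_total_text_length : Option Int) (mapping_from_split_to_original : Option (List (Int × Int))) : List (List String × (List (Int × Int))) :=
  let mp := mapping_from_split_to_original.getD (pvIdMap list_of_texts.length)
  let lengths_text := list_of_texts.map PySem.Str.len
  match max_total_text_length with
  | none => []   -- unreachable under Pre_: same TypeError as A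
  | some M =>
    if lengths_text.sum > M then
      pvBGo list_of_texts mp M lengths_text 0 [] 0
    else
      [(list_of_texts, mp)]

-- ===== PRECONDITION & SPEC =====
-- Pre_ excludes exactly the inputs where the Python A raises once consumed: a None max length
-- (TypeError on 'total > None'), and, when the chunking branch runs with an explicit mapping,
-- a mapping missing some index of the list (KeyError); the nodup-keys conjunct only states that the
-- mapping is a genuine Python dict (an assoc list with duplicate keys is not a value a dict can take).
def Pre_limit_total_length_list_of_text (list_of_texts : List String) (max_total_text_length : Option Int) (mapping_from_split_to_original : Option (List (Int × Int))) : Prop :=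
  ∃ M, max_total_text_length = some M ∧
    (∀ m, mapping_from_split_to_original = some m →
      (m.map Prod.fst).Nodup ∧
      ((list_of_texts.map PySem.Str.len).sum > M →
        ∀ i ∈ List.range list_of_texts.length, (m.lookup (i : Int)).isSome))
instance (list_of_texts : List String) (max_total_text_length : Option Int) (mapping_from_split_to_original : Option (List (Int × Int))) : Decidable (Pre_limit_total_length_list_of_text list_of_texts max_total_text_length mapping_from_split_to_original) := by unfold Pre_limit_total_length_list_of_text; infer_instance

def pvWitness_limit_total_length_list_of_text : List String × Option Int × (Option (List (Int × Int))) :=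
  (["ab", "cde", "f"], some 3, some [(0, 7), (1, 8), (2, 9)])

def Spec_limit_total_length_list_of_text (list_of_texts : List String) (max_total_text_length : Option Int) (mapping_from_split_to_original : Option (List (Int × Int))) (out : List (List String × (List (Int × Int)))) : Prop := out = limit_total_length_list_of_text_alt list_of_texts max_total_text_length mapping_from_split_to_original
instance (list_of_texts : List String) (max_total_text_length : Option Int) (mapping_from_split_to_original : Option (List (Int × Int))) (out : List (List String × (List (Int × Int)))) : Decidable (Spec_limit_total_length_list_of_text list_of_texts max_total_text_length mapping_from_split_to_original out) := by unfold Spec_limit_total_length_list_of_text; infer_instance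

-- ===== CLAIM (what is proved, stated in full; the proofs are below) =====
def Claim_equal_limit_total_length_list_of_text : Prop := ∀ (list_of_texts : List String) (max_total_text_length : Option Int) (mapping_from_split_to_original : Option (List (Int × Int))), Dom_limit_total_length_list_of_text list_of_texts max_total_text_length mapping_from_split_to_original → Pre_limit_total_length_list_of_text list_of_texts max_total_text_length mapping_from_split_to_original → Spec_limit_total_length_list_of_text list_of_texts max_total_text_length mapping_from_split_to_original (limit_total_length_list_of_text list_of_texts max_total_text_length mapping_from_split_to_original)

-- ===== LEMMAS AND PROOFS =====

-- xs[s:s+cnt] as a map of getD over the index range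
lemma pvMap_range_getD (texts : List String) :
    ∀ (cnt s : Nat), s + cnt ≤ texts.length →
      (List.range' s cnt).map (fun i => texts.getD i "") = (texts.drop s).take cnt := by
  intro cnt
  induction cnt with
  | zero => intro s _; simp
  | succ c ih =>
    intro s hs
    have hslt : s < texts.length := by omega
    rw [List.range'_succ, List.map_cons, List.drop_eq_getElem_cons hslt, List.take_succ_cons,
      ih (s + 1) (by omega)]
    simp [List.getD_eq_getElem?_getD, hslt]

-- flushing now or at the next element is the same once the chunk already overflows every continuation
lemma pvBGo_flush (texts : List String) (mp : List (Int × Int)) (M : Int)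
    (rest : List Int) (idx : Nat) (chunk : List Nat) (csum : Int)
    (hch : chunk ≠ []) (hcs : csum > M) (hnn : ∀ l ∈ rest, 0 ≤ l) :
    pvBGo texts mp M rest idx chunk csum
      = pvEmit texts mp chunk :: pvBGo texts mp M rest idx [] 0 := by
  cases rest with
  | nil => simp [pvBGo, hch]
  | cons l r =>
    have hl : (0 : Int) ≤ l := hnn l (by simp)
    have : csum + l > M := by omega
    simp [pvBGo, hch, this]

-- the heart: A's window loop and B's accumulate-and-flush pass agree from any aligned state
lemma pvLoop_agree (texts : List String) (lens : List Int) (mp : List (Int × Int)) (M : Int)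
    (hlen : lens = texts.map PySem.Str.len) :
    ∀ (k idx s : Nat) (S : Int),
      idx + k = texts.length →
      s ≤ idx →
      (k = 0 → s = idx) →
      S = ((lens.drop s).take (idx - s)).sum →
      (s < idx → lens.getD s 0 ≤ M ∧ S + lens.getD idx 0 ≤ M) →
      pvALoop texts lens mp M texts.length k idx s S
        = pvBGo texts mp M (lens.drop idx) idx (List.range' s (idx - s)) S := by
  have hlens_len : lens.length = texts.length := by rw [hlen]; simp
  have hnn : ∀ l ∈ lens, 0 ≤ l := by
    intro l hl; rw [hlen] at hl
    obtain ⟨t, _, rfl⟩ := List.mem_map.mp hl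
    rw [PySem.Str.len_eq]; positivity
  intro k
  induction k with
  | zero =>
    intro idx s S hn hsle hk0 hS hinv
    obtain rfl : s = idx := hk0 rfl
    have hnil : lens.drop s = [] := by apply List.drop_eq_nil_of_le; omega
    simp [pvALoop, hnil, pvBGo]
  | succ k ih =>
    intro idx s S hn hsle hk0 hS hinv
    have hidx : idx < lens.length := by omega
    have hl_eq : lens.getD idx 0 = lens[idx] := List.getD_eq_getElem lens 0 hidx
    have hdrop : lens.drop idx = lens[idx] :: lens.drop (idx + 1) := List.drop_eq_getElem_cons hidx
    have hchunk_succ : List.range' s (idx - s) ++ [idx] = List.range' s (idx + 1 - s) := by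
      have h1 : idx + 1 - s = (idx - s) + 1 := by omega
      rw [h1, List.range'_1_concat]
      congr 2
      omega
    have hSsum : S + lens.getD idx 0 = ((lens.drop s).take (idx + 1 - s)).sum := by
      have h1 : idx + 1 - s = (idx - s) + 1 := by omega
      have h2 : idx - s < (lens.drop s).length := by simp; omega
      rw [h1, List.take_add_one, List.sum_append, hS, hl_eq]
      have h3 : (lens.drop s)[idx - s]? = some lens[idx] := by
        rw [List.getElem?_eq_getElem h2]
        congr 1
        simp [List.getElem_drop]
        congr 1
        omega
      simp [h3]
    -- B makes no flush at this element from an aligned state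
    have hBstep : pvBGo texts mp M (lens.drop idx) idx (List.range' s (idx - s)) S
        = pvBGo texts mp M (lens.drop (idx + 1)) (idx + 1) (List.range' s (idx + 1 - s))
            (S + lens.getD idx 0) := by
      have hno : ¬ (List.range' s (idx - s) ≠ [] ∧ S + lens[idx] > M) := by
        intro ⟨hne, hgt⟩
        rcases Nat.lt_or_ge s idx with hsi | hsi
        · exact absurd (hinv hsi).2 (by omega)
        · obtain rfl : s = idx := by omega
          simp at hne
      rw [hdrop]
      simp only [pvBGo]
      rw [if_neg hno, hchunk_succ, hl_eq]
    rw [pvALoop]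
    by_cases hlast : idx + 1 = texts.length
    · -- branch 1: the end of the list; B appends the last element and flushes after the loop
      rw [if_pos hlast, hBstep]
      have hnil : lens.drop (idx + 1) = [] := by apply List.drop_eq_nil_of_le; omega
      have hne : List.range' s (idx + 1 - s) ≠ [] := by
        simp [List.range'_eq_nil_iff]; omega
      rw [hnil]
      simp only [pvBGo]
      rw [if_pos hne]
      unfold pvEmit
      rw [pvMap_range_getD texts (idx + 1 - s) s (by omega)]
      have h1 : idx + 1 - s = texts.length - s := by omega
      rw [h1, List.take_of_length_le (by simp)]
    · have hlt : idx + 1 < texts.length := by omega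
      have hidx1 : idx + 1 < lens.length := by omega
      have hdrop1 : lens.drop (idx + 1) = lens[idx + 1] :: lens.drop (idx + 2) :=
        List.drop_eq_getElem_cons hidx1
      have hl1_eq : lens.getD (idx + 1) 0 = lens[idx + 1] := List.getD_eq_getElem lens 0 hidx1
      -- the fresh-chunk restart, shared by branches 2 and 3
      have hrestart : pvBGo texts mp M (lens.drop (idx + 1)) (idx + 1) [] 0
          = pvBGo texts mp M (lens.drop (idx + 2)) (idx + 2) [idx + 1] lens[idx + 1] := by
        rw [hdrop1]
        simp only [pvBGo]
        rw [if_neg (by simp)]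
        norm_num
      have hrec : pvALoop texts lens mp M texts.length k (idx + 1) (idx + 1) 0
          = pvBGo texts mp M (lens.drop (idx + 1)) (idx + 1) [] 0 := by
        have := ih (idx + 1) (idx + 1) 0 (by omega) (by omega) (fun _ => rfl) (by simp) (by omega)
        simpa using this
      by_cases hbig : lens.getD s 0 > M
      · -- branch 2: the element at idx_start alone is too large (forces s = idx)
        have hsi : s = idx := by
          rcases Nat.lt_or_ge s idx with hsi | hsi
          · exact absurd (hinv hsi).1 (by omega)
          · omega
        subst hsi
        have hS0 : S = 0 := by rw [hS]; simp
        rw [if_neg hlast, if_pos hbig, hrec, hBstep]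
        have h1 : s + 1 - s = 1 := by omega
        rw [h1]
        have hflush := pvBGo_flush texts mp M (lens.drop (s + 1)) (s + 1)
          (List.range' s 1) (S + lens.getD s 0)
          (by simp) (by omega) (fun l hl => hnn l (List.mem_of_mem_drop hl))
        rw [hflush]
        congr 1
      · by_cases hover : S + lens.getD idx 0 + lens.getD (idx + 1) 0 > M
        · -- branch 3: the next element would overflow the window, so B flushes when it arrives
          rw [if_neg hlast, if_neg hbig, if_pos hover, hrec, hBstep, hrestart]
          have hR : pvBGo texts mp M (lens.drop (idx + 1)) (idx + 1)
              (List.range' s (idx + 1 - s)) (S + lens.getD idx 0)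
              = pvEmit texts mp (List.range' s (idx + 1 - s)) ::
                  pvBGo texts mp M (lens.drop (idx + 2)) (idx + 2) [idx + 1] lens[idx + 1] := by
            rw [hdrop1]
            simp only [pvBGo]
            rw [if_pos ⟨by simp [List.range'_eq_nil_iff]; omega, by omega⟩]
          rw [hR]
          congr 1
          unfold pvEmit
          rw [pvMap_range_getD texts (idx + 1 - s) s (by omega)]
        · -- no yield: extend the window
          rw [if_neg hlast, if_neg hbig, if_neg hover, hBstep]
          exact ih (idx + 1) s (S + lens.getD idx 0) (by omega) (by omega)
            (by omega) (by rw [hSsum]) (fun _ => ⟨by omega, by omega⟩)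

-- ===== VERDICT (by name: the statement is the Claim_ definition above) =====
theorem limit_total_length_list_of_text_spec : Claim_equal_limit_total_length_list_of_text := by
  intro texts maxLen mapping _ hpre
  unfold Spec_limit_total_length_list_of_text
  obtain ⟨M, hM, _⟩ := hpre
  subst hM
  unfold limit_total_length_list_of_text limit_total_length_list_of_text_alt
  by_cases htot : (texts.map PySem.Str.len).sum > M
  · simp only [htot, if_pos]
    rw [pvLoop_agree texts (texts.map PySem.Str.len) _ M rfl texts.length 0 0 0
      (by omega) (by omega) (by omega) (by simp) (by omega)]
    simp
  · simp [htot]
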